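-- pv_equiv track=rewrite | github.com/krishna19-me/interview_practice | personal-practice/python-programs/first-repeating-element.py | find_repeating_1
-- ===== SOURCE A (Python) =====
-- def find_repeating_1(lst):
--     set = dict()
--     idx = -1
--     for i in range(len(lst)):
--         if lst[i] in set:
--             idx = i
--         else:
--             set[lst[i]] =1
--     return f"Element is {lst[idx]}"
-- ===== SOURCE B (Python) =====
-- def find_repeating_1(lst):
--     first = {}
--     for i, x in enumerate(lst):
--         if x not in first:
--             first[x] = i
--     idx = -1
--     for i in range(len(lst) - 1, -1, -1):
--         if first[lst[i]] < i:
--             idx = i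
--             break
--     return f"Element is {lst[idx]}"
-- ===== Notes on version B (the rewrite author's own statement) =====
-- stated objective: alternative
-- what changed: B replaces A's single forward pass with an incrementally updated seen-dict by a first-occurrence index table built once, then a reverse scan with early exit that returns the greatest index whose element's first occurrence is strictly earlier.
import Mathlib
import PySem

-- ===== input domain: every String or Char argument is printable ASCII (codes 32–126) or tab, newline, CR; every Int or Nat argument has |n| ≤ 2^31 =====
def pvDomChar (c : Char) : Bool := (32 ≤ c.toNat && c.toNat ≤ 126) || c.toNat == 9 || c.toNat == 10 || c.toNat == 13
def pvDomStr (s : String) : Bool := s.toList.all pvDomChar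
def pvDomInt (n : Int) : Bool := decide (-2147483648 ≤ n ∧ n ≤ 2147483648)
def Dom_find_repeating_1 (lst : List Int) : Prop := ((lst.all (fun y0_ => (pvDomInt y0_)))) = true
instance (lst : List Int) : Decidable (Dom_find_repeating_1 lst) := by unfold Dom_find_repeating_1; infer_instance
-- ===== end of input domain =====

-- B builds a first-occurrence index table once and then scans from the right with an early
-- exit, instead of A's single forward pass that updates a seen-dict and an index as it goes.


-- ===== PORT A =====
-- A's loop state: (the dict named `set` in the source, idx); loops i over range(len(lst)).
def stateA (lst : List Int) : PySem.Dict Int Int × Int :=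
  (PySem.List.pyRange 0 (lst.length : Int) 1).foldl
    (fun st i =>
      -- lst[i] (read in the test and again in the assignment); i is always in range here
      if st.1.contains (PySem.List.pyGetD lst i 0) then (st.1, i)
      else (st.1.insert (PySem.List.pyGetD lst i 0) 1, st.2))
    (PySem.Dict.empty, -1)

def find_repeating_1 (lst : List Int) : String :=
  match PySem.List.pyGet? lst (stateA lst).2 with  -- lst[idx]; none = IndexError (excluded by Pre_)
  | some v => "Element is " ++ PySem.Int.toStr v
  | none => ""

-- ===== PORT B =====
-- first pass of Source B: dict mapping each element to its first index of occurrence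
def bFirst (lst : List Int) : PySem.Dict Int Int :=
  (PySem.List.enumerate lst).foldl
    (fun d p => if d.contains p.2 then d else d.insert p.2 p.1)
    PySem.Dict.empty

-- second pass of Source B: for i in range(len-1, -1, -1), break at the first i with first[lst[i]] < i.
-- `first[lst[i]]` can never raise KeyError (every element is a key), so the getD default is dead.
def bScan (lst : List Int) (d : PySem.Dict Int Int) : Nat → Int
  | 0 => -1
  | n + 1 =>
      if d.getD (PySem.List.pyGetD lst (n : Int) 0) 0 < (n : Int) then (n : Int)
      else bScan lst d n

def find_repeating_1_alt (lst : List Int) : String :=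
  match PySem.List.pyGet? lst (bScan lst (bFirst lst) lst.length) with
  | some v => "Element is " ++ PySem.Int.toStr v
  | none => ""

-- ===== PRECONDITION & SPEC =====
-- Pre_ excludes only the empty list, on which Python A raises IndexError (lst[-1]).
def Pre_find_repeating_1 (lst : List Int) : Prop := lst ≠ []
instance (lst : List Int) : Decidable (Pre_find_repeating_1 lst) := by unfold Pre_find_repeating_1; infer_instance
def pvWitness_find_repeating_1 : List Int := ([1, 2, 1, 3])

def Spec_find_repeating_1 (lst : List Int) (out : String) : Prop := out = find_repeating_1_alt lst
instance (lst : List Int) (out : String) : Decidable (Spec_find_repeating_1 lst out) := by unfold Spec_find_repeating_1; infer_instance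

-- ===== CLAIM (what is proved, stated in full; the proofs are below) =====
def Claim_equal_find_repeating_1 : Prop := ∀ (lst : List Int), Dom_find_repeating_1 lst → Pre_find_repeating_1 lst → Spec_find_repeating_1 lst (find_repeating_1 lst)

-- ===== LEMMAS AND PROOFS =====

-- Common reference value: the greatest i < n whose element already occurs in lst.take i, else -1.
def lastRep (lst : List Int) : Nat → Int
  | 0 => -1
  | n + 1 => if lst.getD n 0 ∈ lst.take n then (n : Int) else lastRep lst n

theorem lastRep_append (ys : List Int) (y : Int) :
    ∀ n, n ≤ ys.length → lastRep (ys ++ [y]) n = lastRep ys n := by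
  intro n hn
  induction n with
  | zero => rfl
  | succ m ih =>
      have hm : m < ys.length := by omega
      simp only [lastRep]
      rw [List.take_append_of_le_length (by omega),
          List.getD_eq_getElem?_getD, List.getD_eq_getElem?_getD,
          List.getElem?_append_left hm, ih (by omega)]

theorem stateA_append (ys : List Int) (y : Int) :
    stateA (ys ++ [y]) =
      (if (stateA ys).1.contains y
        then ((stateA ys).1, (ys.length : Int))
        else ((stateA ys).1.insert y 1, (stateA ys).2)) := by
  unfold stateA
  have hlen : ((ys ++ [y]).length : Int) = (ys.length : Int) + 1 := by
    push_cast [List.length_append, List.length_singleton]; ring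
  rw [hlen, PySem.List.pyRange_one_succ_right (by positivity), List.foldl_append]
  have hbody :
      (PySem.List.pyRange 0 (ys.length : Int) 1).foldl
        (fun st i =>
          if st.1.contains (PySem.List.pyGetD (ys ++ [y]) i 0) then (st.1, i)
          else (st.1.insert (PySem.List.pyGetD (ys ++ [y]) i 0) 1, st.2))
        ((PySem.Dict.empty, -1) : PySem.Dict Int Int × Int)
      = (PySem.List.pyRange 0 (ys.length : Int) 1).foldl
        (fun st i =>
          if st.1.contains (PySem.List.pyGetD ys i 0) then (st.1, i)
          else (st.1.insert (PySem.List.pyGetD ys i 0) 1, st.2))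
        ((PySem.Dict.empty, -1) : PySem.Dict Int Int × Int) := by
    apply List.foldl_ext
    intro st i hi
    have hi' := (PySem.List.mem_pyRange_one.mp hi)
    have hget : PySem.List.pyGetD (ys ++ [y]) i 0 = PySem.List.pyGetD ys i 0 := by
      rw [PySem.List.pyGetD_eq_getElem (ys ++ [y]) 0 hi'.1
            (by push_cast [List.length_append, List.length_singleton]; omega),
          PySem.List.pyGetD_eq_getElem ys 0 hi'.1 (by omega)]
      exact List.getElem_append_left (by omega)
    rw [hget]
  rw [hbody]
  have hlast : PySem.List.pyGetD (ys ++ [y]) (ys.length : Int) 0 = y := by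
    rw [PySem.List.pyGetD_eq_getElem (ys ++ [y]) 0 (by positivity) (by simp)]
    simp
  simp only [List.foldl_cons, List.foldl_nil, hlast]

theorem stateA_contains (lst : List Int) :
    ∀ x, (stateA lst).1.contains x = decide (x ∈ lst) := by
  induction lst using List.reverseRecOn with
  | nil =>
      intro x
      simp [stateA, PySem.List.pyRange, PySem.Dict.contains_empty]
  | append_singleton ys y ih =>
      intro x
      rw [stateA_append]
      by_cases hc : (stateA ys).1.contains y = true
      · have hy : y ∈ ys := by
          have h := ih y
          rw [hc] at h
          exact of_decide_eq_true h.symm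
        rw [if_pos hc]
        rw [ih x]
        by_cases h : x = y <;> simp [List.mem_append, h, hy]
      · rw [if_neg hc]
        rw [PySem.Dict.contains_insert, ih x]
        by_cases h : x = y <;> simp [List.mem_append, h]

theorem stateA_idx (lst : List Int) :
    (stateA lst).2 = lastRep lst lst.length := by
  induction lst using List.reverseRecOn with
  | nil => rfl
  | append_singleton ys y ih =>
      rw [stateA_append]
      have hlen : (ys ++ [y]).length = ys.length + 1 := by simp
      rw [hlen]
      simp only [lastRep]
      have hget : (ys ++ [y]).getD ys.length 0 = y := by
        rw [List.getD_eq_getElem?_getD]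
        simp
      have htake : (ys ++ [y]).take ys.length = ys := by
        simp [List.take_append_of_le_length (l₂ := [y]) (le_refl ys.length)]
      rw [hget, htake]
      by_cases hy : y ∈ ys
      · have hcy : (stateA ys).1.contains y = true := by
          rw [stateA_contains ys y]; simp [hy]
        rw [if_pos hcy, if_pos hy]
      · have hcy : ¬ (stateA ys).1.contains y = true := by
          rw [stateA_contains ys y]; simp [hy]
        rw [if_neg hcy, if_neg hy, ih]
        exact (lastRep_append ys y ys.length (le_refl _)).symm

-- first-occurrence dict: full characterisation of the fold in bFirst
theorem bFirst_go (xs : List Int) :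
    ∀ (s : Int) (d : PySem.Dict Int Int) (x : Int),
      ((PySem.List.enumerate xs s).foldl
        (fun d p => if d.contains p.2 then d else d.insert p.2 p.1) d).get? x
      = if d.contains x then d.get? x
        else if x ∈ xs then some (s + (xs.idxOf x : Int)) else d.get? x := by
  induction xs with
  | nil => intro s d x; simp [PySem.List.enumerate_nil]
  | cons a xs ih =>
      intro s d x
      rw [PySem.List.enumerate_cons, List.foldl_cons]
      by_cases hda : d.contains a = true
      · simp only [hda, if_true, ih]
        by_cases hdx : d.contains x = true
        · simp [hdx]
        · simp only [hdx, Bool.false_eq_true, if_false]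
          by_cases hx : x ∈ xs
          · have hxa : x ≠ a := by rintro rfl; exact hdx hda
            rw [List.idxOf_cons_ne xs (Ne.symm hxa)]
            simp [hx, hxa]
            ring
          · have hxa : x ≠ a := by rintro rfl; exact hdx hda
            simp [hx, hxa]
      · simp only [hda, Bool.false_eq_true, if_false, ih]
        by_cases hxa : x = a
        · subst hxa
          simp [PySem.Dict.contains_insert_self, PySem.Dict.get?_insert_self, hda,
                List.idxOf_cons_self]
        · have hci : (d.insert a s).contains x = d.contains x := by
            rw [PySem.Dict.contains_insert]
            simp [hxa]
          have hgi : (d.insert a s).get? x = d.get? x :=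
            PySem.Dict.get?_insert_of_ne d s hxa
          rw [hci, hgi]
          by_cases hdx : d.contains x = true
          · simp [hdx]
          · simp only [hdx, Bool.false_eq_true, if_false]
            by_cases hx : x ∈ xs
            · rw [List.idxOf_cons_ne xs (Ne.symm hxa)]
              simp [hx, hxa]
              ring
            · simp [hx, hxa]

theorem bFirst_get? (lst : List Int) (x : Int) (hx : x ∈ lst) :
    (bFirst lst).get? x = some (lst.idxOf x : Int) := by
  unfold bFirst
  rw [bFirst_go lst 0 PySem.Dict.empty x]
  simp [PySem.Dict.contains_empty, hx]

theorem bScan_eq_lastRep (lst : List Int) :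
    ∀ n, n ≤ lst.length → bScan lst (bFirst lst) n = lastRep lst n := by
  intro n hn
  induction n with
  | zero => rfl
  | succ m ih =>
      have hm : m < lst.length := by omega
      simp only [bScan, lastRep]
      have hget : PySem.List.pyGetD lst (m : Int) 0 = lst[m] := by
        rw [PySem.List.pyGetD_natCast, List.getD_eq_getElem?_getD]
        simp [hm]
      have hmem : lst[m] ∈ lst := List.getElem_mem hm
      have hgd : (bFirst lst).getD lst[m] 0 = (lst.idxOf lst[m] : Int) :=
        PySem.Dict.getD_of_get?_eq_some (bFirst lst) 0 (bFirst_get? lst lst[m] hmem)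
      have hiff : ((lst.idxOf lst[m] : Int) < (m : Int)) ↔ lst[m] ∈ lst.take m := by
        rw [Int.ofNat_lt]
        exact ⟨fun h => (List.mem_take_iff_idxOf_lt hmem).mpr h,
               fun h => (List.mem_take_iff_idxOf_lt hmem).mp h⟩
      rw [hget, hgd]
      have hgD : lst.getD m 0 = lst[m] := by
        rw [List.getD_eq_getElem?_getD]; simp [hm]
      rw [hgD]
      by_cases hc : lst[m] ∈ lst.take m
      · simp [hiff.mpr hc, hc]
      · have : ¬ ((lst.idxOf lst[m] : Int) < (m : Int)) := fun h => hc (hiff.mp h)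
        simp only [this, if_false, hc, if_false]
        exact ih (by omega)

-- ===== VERDICT (by name: the statement is the Claim_ definition above) =====
theorem find_repeating_1_spec : Claim_equal_find_repeating_1 := by
  intro lst _ _
  unfold Spec_find_repeating_1 find_repeating_1 find_repeating_1_alt
  rw [stateA_idx, bScan_eq_lastRep lst lst.length (le_refl _)]
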